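-- pv_equiv track=rewrite | github.com/katarzynaadamczyk/AoC | Day_15/task2_7.py | checkonx
-- ===== SOURCE A (Python) =====
-- def checkonx(data, result, x, y):
--     if y < len(data) - 1:
--         tmp = []
--         for i in range(max(0, x - 20), min(x, len(data[y]))):
--             act = result[i] + data[y+1][i]
--             for j in range(i + 1, min(x+1, len(data[y]))):
--                 act += data[y+1][j]
--             tmp.append(act)
--         if y < len(data) - 2:
--             for i in range(max(0, x - 20), min(x, len(data[y]))):
--                 act = result[i] + data[y+2][i] + data[y+1][i]
--                 for j in range(i + 1, min(x+1, len(data[y]))):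
--                     act += data[y+2][j]
--                 act += data[y+1][min(x, len(data[y])-1)]
--                 tmp.append(act)
--         return (min(tmp)) if len(tmp) > 0 else -1
--     else:
--         return -1
-- ===== SOURCE B (Python) =====
-- def checkonx(data, result, x, y):
--     if y >= len(data) - 1:
--         return -1
--     L = len(data[y])
--     lo = max(0, x - 20)
--     hi = min(x, L)
--     if lo >= hi:
--         return -1
--     cut = min(x + 1, L)
--     row1 = data[y + 1]
--     # prefix sums of row1 over indices [lo, cut)
--     p1 = [0]
--     for v in row1[lo:cut]:
--         p1.append(p1[-1] + v)
--     best = None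
--     for i in range(lo, hi):
--         act = result[i] + row1[i] + (p1[cut - lo] - p1[i + 1 - lo])
--         if best is None or act < best:
--             best = act
--     if y < len(data) - 2:
--         row2 = data[y + 2]
--         p2 = [0]
--         for v in row2[lo:cut]:
--             p2.append(p2[-1] + v)
--         const = row1[min(x, L - 1)]
--         for i in range(lo, hi):
--             act = result[i] + row2[i] + row1[i] + (p2[cut - lo] - p2[i + 1 - lo]) + const
--             if best is None or act < best:
--                 best = act
--     return best
-- ===== Notes on version B (the rewrite author's own statement) =====
-- stated objective: alternative
-- what changed: Replaces A's quadratic nested loops (re-summing the tail of data[y+1]/data[y+2] for every window index) by prefix-sum arrays built once, so each candidate is a prefix difference, and replaces the tmp list + min() by a running minimum; window size is bounded by 21 so the win is a constant factor, not measured as 1.5x.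
import Mathlib
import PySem

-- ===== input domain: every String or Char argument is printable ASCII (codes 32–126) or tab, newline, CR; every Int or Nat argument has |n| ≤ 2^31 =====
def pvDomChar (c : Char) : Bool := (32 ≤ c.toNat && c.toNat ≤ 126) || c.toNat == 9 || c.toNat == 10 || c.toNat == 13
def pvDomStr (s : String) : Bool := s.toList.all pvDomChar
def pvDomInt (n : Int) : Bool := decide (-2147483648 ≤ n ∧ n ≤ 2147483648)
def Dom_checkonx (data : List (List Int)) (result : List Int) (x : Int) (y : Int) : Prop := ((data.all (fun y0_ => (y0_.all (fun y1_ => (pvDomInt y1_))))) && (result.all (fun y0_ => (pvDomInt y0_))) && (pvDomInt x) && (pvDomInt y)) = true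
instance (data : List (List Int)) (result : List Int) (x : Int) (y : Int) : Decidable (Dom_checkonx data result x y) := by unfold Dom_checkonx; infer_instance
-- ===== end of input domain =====

-- B replaces A's nested re-summation of data[y+1]/data[y+2] tails by prefix-sum arrays and the
-- tmp list + min() by a running minimum; an alternative decomposition of the same exact function.

-- ===== PORT A =====
-- data[k] (Python indexing, negative from the end); total form, exact under Pre_ (InRange)
def pvRow (data : List (List Int)) (k : Int) : List Int := (PySem.List.pyGet? data k).getD []
-- xs[i] for Int i; total form, exact under Pre_
def pvAt (xs : List Int) (i : Int) : Int := PySem.List.pyGetD xs i 0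

def checkonx (data : List (List Int)) (result : List Int) (x : Int) (y : Int) : Int :=
  if y < PySem.List.len data - 1 then
    let tmp : List Int :=
      (PySem.List.pyRange (max 0 (x - 20)) (min x (PySem.List.len (pvRow data y))) 1).foldl
        (fun tmp i =>
          let act := pvAt result i + pvAt (pvRow data (y + 1)) i
          let act := (PySem.List.pyRange (i + 1) (min (x + 1) (PySem.List.len (pvRow data y))) 1).foldl
            (fun act j => act + pvAt (pvRow data (y + 1)) j) act
          tmp ++ [act]) []
    let tmp : List Int :=
      if y < PySem.List.len data - 2 then
        (PySem.List.pyRange (max 0 (x - 20)) (min x (PySem.List.len (pvRow data y))) 1).foldl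
          (fun tmp i =>
            let act := pvAt result i + pvAt (pvRow data (y + 2)) i + pvAt (pvRow data (y + 1)) i
            let act := (PySem.List.pyRange (i + 1) (min (x + 1) (PySem.List.len (pvRow data y))) 1).foldl
              (fun act j => act + pvAt (pvRow data (y + 2)) j) act
            let act := act + pvAt (pvRow data (y + 1)) (min x (PySem.List.len (pvRow data y) - 1))
            tmp ++ [act]) tmp
      else tmp
    if tmp.length > 0 then (PySem.List.min? tmp (fun v => v)).getD (-1) else -1
  else -1

-- ===== PORT B =====
-- the prefix-sum list Source B builds with `p = [0]; for v in …: p.append(p[-1] + v)`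
def pvPrefix (s : List Int) : List Int :=
  s.foldl (fun p v => p ++ [pvAt p (-1) + v]) [0]
-- the running-minimum update `if best is None or act < best: best = act`
def pvUpd (best : Option Int) (a : Int) : Option Int :=
  if best.isNone ∨ a < best.getD 0 then some a else best

def checkonx_alt (data : List (List Int)) (result : List Int) (x : Int) (y : Int) : Int :=
  if y ≥ PySem.List.len data - 1 then -1
  else
    let L := PySem.List.len (pvRow data y)
    let lo := max 0 (x - 20)
    let hi := min x L
    if lo ≥ hi then -1
    else
      let cut := min (x + 1) L
      let row1 := pvRow data (y + 1)
      let p1 := pvPrefix (PySem.List.slice row1 (some lo) (some cut))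
      let best : Option Int :=
        (PySem.List.pyRange lo hi 1).foldl
          (fun best i =>
            pvUpd best (pvAt result i + pvAt row1 i + (pvAt p1 (cut - lo) - pvAt p1 (i + 1 - lo)))) none
      let best : Option Int :=
        if y < PySem.List.len data - 2 then
          let row2 := pvRow data (y + 2)
          let p2 := pvPrefix (PySem.List.slice row2 (some lo) (some cut))
          let c := pvAt row1 (min x (L - 1))
          (PySem.List.pyRange lo hi 1).foldl
            (fun best i =>
              pvUpd best (pvAt result i + pvAt row2 i + pvAt row1 i +
                (pvAt p2 (cut - lo) - pvAt p2 (i + 1 - lo)) + c)) best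
        else best
      best.getD (-1)

-- ===== PRECONDITION & SPEC =====
-- Pre_ excludes exactly the inputs where the Python A raises an IndexError: a row index y outside
-- data's Python index range while y < len(data)-1, or (when the window is non-empty) result or the
-- rows data[y+1] / data[y+2] too short for the window indices A reads.
def Pre_checkonx (data : List (List Int)) (result : List Int) (x : Int) (y : Int) : Prop :=
  y < PySem.List.len data - 1 →
    PySem.Raise.InRange data.length y ∧
    (max 0 (x - 20) < min x (PySem.List.len (pvRow data y)) →
      min x (PySem.List.len (pvRow data y)) - 1 < PySem.List.len result ∧
      min x (PySem.List.len (pvRow data y) - 1) < PySem.List.len (pvRow data (y + 1)) ∧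
      (y < PySem.List.len data - 2 →
        min x (PySem.List.len (pvRow data y) - 1) < PySem.List.len (pvRow data (y + 2))))
instance (data : List (List Int)) (result : List Int) (x : Int) (y : Int) : Decidable (Pre_checkonx data result x y) := by unfold Pre_checkonx; infer_instance

def pvWitness_checkonx : List (List Int) × List Int × Int × Int := ([[1, 2], [3, 4]], [5, 6], 2, 0)

def Spec_checkonx (data : List (List Int)) (result : List Int) (x : Int) (y : Int) (out : Int) : Prop := out = checkonx_alt data result x y
instance (data : List (List Int)) (result : List Int) (x : Int) (y : Int) (out : Int) : Decidable (Spec_checkonx data result x y out) := by unfold Spec_checkonx; infer_instance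

-- ===== CLAIM (what is proved, stated in full; the proofs are below) =====
def Claim_equal_checkonx : Prop := ∀ (data : List (List Int)) (result : List Int) (x : Int) (y : Int), Dom_checkonx data result x y → Pre_checkonx data result x y → Spec_checkonx data result x y (checkonx data result x y)

-- ===== LEMMAS AND PROOFS =====

def pvSums (c : Int) : List Int → List Int
  | [] => []
  | v :: s => (c + v) :: pvSums (c + v) s

theorem pvPrefix_eq_sums (s : List Int) (acc : List Int) (c : Int)
    (hne : acc ≠ []) (hlast : pvAt acc (-1) = c) :
    s.foldl (fun p v => p ++ [pvAt p (-1) + v]) acc = acc ++ pvSums c s := by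
  induction s generalizing acc c with
  | nil => simp [pvSums]
  | cons v s ih =>
    simp only [List.foldl_cons, pvSums]
    rw [ih (acc ++ [pvAt acc (-1) + v]) (c + v) (by simp)
      (by simp only [pvAt, PySem.List.pyGetD_neg_one_append_singleton]; rw [show PySem.List.pyGetD acc (-1) 0 = c from hlast])]
    simp only [List.append_assoc, List.singleton_append]
    congr 2
    rw [hlast]

theorem pvSums_getD (s : List Int) (c : Int) (k : Nat) (hk : k < s.length) :
    (pvSums c s).getD k 0 = c + (s.take (k + 1)).sum := by
  induction s generalizing c k with
  | nil => simp at hk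
  | cons v s ih =>
    cases k with
    | zero => simp [pvSums]
    | succ k =>
      simp only [pvSums, List.getD_cons_succ, List.take_succ_cons, List.sum_cons]
      rw [ih (c + v) k (by simpa using hk)]
      ring

theorem pvPrefix_at (s : List Int) (k : Int) (h0 : 0 ≤ k) (h1 : k ≤ (s.length : Int)) :
    pvAt (pvPrefix s) k = (s.take k.toNat).sum := by
  have h := pvPrefix_eq_sums s [0] 0 (by simp) (by simp [pvAt]; rfl)
  unfold pvPrefix
  rw [h]
  rcases Int.eq_ofNat_of_zero_le h0 with ⟨n, rfl⟩
  simp only [pvAt, PySem.List.pyGetD_natCast, Int.toNat_natCast]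
  cases n with
  | zero => simp
  | succ m =>
    have hm : m < s.length := by omega
    simp only [List.singleton_append, List.getD_cons_succ]
    rw [pvSums_getD s 0 m hm]
    simp

theorem pvSum_pyRange (xs : List Int) (a b : Int) (h0 : 0 ≤ a) (h1 : b ≤ (xs.length : Int)) :
    ((PySem.List.pyRange a b 1).map (fun j => pvAt xs j)).sum
      = ((xs.drop a.toNat).take (b - a).toNat).sum := by
  by_cases hab : b ≤ a
  · rw [PySem.List.pyRange_one_eq_nil hab]
    simp [Int.toNat_of_nonpos (by omega : b - a ≤ 0)]
  · rw [not_le] at hab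
    have hlen : a.toNat < xs.length := by omega
    rw [PySem.List.pyRange_one_cons hab]
    have hdrop : xs.drop a.toNat = xs[a.toNat] :: xs.drop (a.toNat + 1) := by
      exact (List.drop_eq_getElem_cons hlen)
    have hrec := pvSum_pyRange xs (a + 1) b (by omega) h1
    simp only [List.map_cons, List.sum_cons, hrec]
    rw [hdrop]
    have ht : (b - a).toNat = (b - (a + 1)).toNat + 1 := by omega
    rw [ht, List.take_succ_cons, List.sum_cons]
    have : (a + 1).toNat = a.toNat + 1 := by omega
    rw [this]
    congr 1
    rw [pvAt, PySem.List.pyGetD_eq_getElem xs 0 h0 (by omega)]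
termination_by (b - a).toNat
decreasing_by omega

theorem pvPrefix_diff (row : List Int) (lo cut i : Int)
    (h0 : 0 ≤ lo) (h1 : lo ≤ i + 1) (h2 : i + 1 ≤ cut) (h3 : cut ≤ (row.length : Int)) :
    pvAt (pvPrefix (PySem.List.slice row (some lo) (some cut))) (cut - lo)
      - pvAt (pvPrefix (PySem.List.slice row (some lo) (some cut))) (i + 1 - lo)
      = ((PySem.List.pyRange (i + 1) cut 1).map (fun j => pvAt row j)).sum := by
  have hc : 0 ≤ cut := by omega
  set s := PySem.List.slice row (some lo) (some cut) with hs
  have hslen : s.length = (cut - lo).toNat := by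
    rw [hs, PySem.List.slice_toNat row h0 hc]
    simp only [List.length_take, List.length_drop]
    omega
  have e1 : pvAt (pvPrefix s) (cut - lo) = (s.take (cut - lo).toNat).sum :=
    pvPrefix_at s (cut - lo) (by omega) (by omega)
  have e2 : pvAt (pvPrefix s) (i + 1 - lo) = (s.take (i + 1 - lo).toNat).sum :=
    pvPrefix_at s (i + 1 - lo) (by omega) (by omega)
  rw [e1, e2, pvSum_pyRange row (i + 1) cut (by omega) h3]
  have hfull : s.take (cut - lo).toNat = s := List.take_of_length_le (by omega)
  rw [hfull]
  have hsplit : (s.take (i + 1 - lo).toNat).sum + (s.drop (i + 1 - lo).toNat).sum = s.sum := by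
    rw [← List.sum_append, List.take_append_drop]
  have hdrop : s.drop (i + 1 - lo).toNat = (row.drop (i + 1).toNat).take (cut - (i + 1)).toNat := by
    rw [hs, PySem.List.slice_toNat row h0 hc, List.drop_take, List.drop_drop]
    congr 1
    · omega
    · congr 1
      omega
  rw [← hdrop]
  omega

theorem pvUpd_foldl_some (l : List Int) (b : Int) :
    l.foldl pvUpd (some b) = some (l.foldl min b) := by
  induction l generalizing b with
  | nil => rfl
  | cons a l ih =>
    simp only [List.foldl_cons]
    have : pvUpd (some b) a = some (min b a) := by
      unfold pvUpd
      simp only [Option.isNone_some, Option.getD_some, Bool.false_eq_true, false_or]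
      split_ifs with h
      · congr 1
        omega
      · congr 1
        omega
    rw [this, ih]

theorem pvUpd_foldl_cons (a : Int) (l : List Int) :
    (a :: l).foldl pvUpd none = some (l.foldl min a) := by
  simp only [List.foldl_cons]
  have : pvUpd none a = some a := rfl
  rw [this, pvUpd_foldl_some]


theorem pvUpd_foldl_map (r : List Int) (f : Int → Int) (init : Option Int) :
    r.foldl (fun best i => pvUpd best (f i)) init = (r.map f).foldl pvUpd init :=
  (List.foldl_map).symm

theorem checkonx_main : ∀ (data : List (List Int)) (result : List Int) (x : Int) (y : Int), Dom_checkonx data result x y → Pre_checkonx data result x y → checkonx data result x y = checkonx_alt data result x y := by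
  intro data result x y _ hpre
  unfold Pre_checkonx at hpre
  unfold checkonx checkonx_alt
  simp only [PySem.List.len_eq] at hpre ⊢
  by_cases hy : y < (data.length : Int) - 1
  · obtain ⟨hin, hwin⟩ := hpre hy
    rw [if_pos hy, if_neg (by omega : ¬ y ≥ (data.length : Int) - 1)]
    set R1 := pvRow data (y + 1) with hR1
    set R2 := pvRow data (y + 2) with hR2
    set L : Int := ((pvRow data y).length : Int) with hL
    set lo := max 0 (x - 20) with hlo
    set hi := min x L with hhi
    set cut := min (x + 1) L with hcut
    by_cases hlh : lo < hi
    · rw [if_neg (by omega : ¬ lo ≥ hi)]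
      obtain ⟨hres, h1, h2⟩ := hwin hlh
      simp only [PySem.List.foldl_append_singleton_eq_map, List.nil_append,
        PySem.List.foldl_add, pvUpd_foldl_map]
      have hm1 : (PySem.List.pyRange lo hi 1).map
            (fun i => pvAt result i + pvAt R1 i +
              (pvAt (pvPrefix (PySem.List.slice R1 (some lo) (some cut))) (cut - lo)
               - pvAt (pvPrefix (PySem.List.slice R1 (some lo) (some cut))) (i + 1 - lo)))
          = (PySem.List.pyRange lo hi 1).map
            (fun i => pvAt result i + pvAt R1 i +
              ((PySem.List.pyRange (i + 1) cut 1).map (fun j => pvAt R1 j)).sum) := by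
        apply List.map_congr_left
        intro i hmem
        rw [PySem.List.mem_pyRange_one] at hmem
        rw [pvPrefix_diff R1 lo cut i (by omega) (by omega) (by omega) (by omega)]
      rw [hm1]
      by_cases hc2 : y < (data.length : Int) - 2
      · rw [if_pos hc2, if_pos hc2]
        have hm2 : (PySem.List.pyRange lo hi 1).map
              (fun i => pvAt result i + pvAt R2 i + pvAt R1 i +
                (pvAt (pvPrefix (PySem.List.slice R2 (some lo) (some cut))) (cut - lo)
                 - pvAt (pvPrefix (PySem.List.slice R2 (some lo) (some cut))) (i + 1 - lo))
                + pvAt R1 (min x (L - 1)))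
            = (PySem.List.pyRange lo hi 1).map
              (fun i => pvAt result i + pvAt R2 i + pvAt R1 i +
                ((PySem.List.pyRange (i + 1) cut 1).map (fun j => pvAt R2 j)).sum
                + pvAt R1 (min x (L - 1))) := by
          apply List.map_congr_left
          intro i hmem
          rw [PySem.List.mem_pyRange_one] at hmem
          rw [pvPrefix_diff R2 lo cut i (by omega) (by omega) (by omega) (by omega)]
        rw [hm2]
        rw [PySem.List.pyRange_one_cons hlh]
        simp only [List.map_cons, List.cons_append, List.length_cons]
        rw [if_pos (by omega : 0 < _ + 1)]
        rw [PySem.List.min?_id_cons, pvUpd_foldl_cons, pvUpd_foldl_some, List.foldl_append]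
      · rw [if_neg hc2, if_neg hc2]
        rw [PySem.List.pyRange_one_cons hlh]
        simp only [List.map_cons, List.length_cons]
        rw [if_pos (by omega : 0 < _ + 1)]
        rw [PySem.List.min?_id_cons, pvUpd_foldl_cons]
    · rw [if_pos (by omega : lo ≥ hi)]
      rw [PySem.List.pyRange_one_eq_nil (by omega)]
      simp
  · rw [if_neg hy, if_pos (by omega)]

-- ===== VERDICT (by name: the statement is the Claim_ definition above) =====
theorem checkonx_spec : Claim_equal_checkonx := by
  intro data result x y hdom hpre
  unfold Spec_checkonx
  exact checkonx_main data result x y hdom hpre
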